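-- pv_equiv track=rewrite | github.com/posl/comment_recommendation | script/mod_gen/2_time/zh/265_A/8.py | solve
-- ===== SOURCE A (Python) =====
-- def solve(x, y, n):
--     ans = 0
--     while n > 0:
--         if n >= 3:
--             if x * 3 > y:
--                 ans += y
--                 n -= 3
--             else:
--                 ans += x
--                 n -= 1
--         else:
--             ans += x
--             n -= 1
--     return ans
-- ===== SOURCE B (Python) =====
-- def solve(x, y, n):
--     if n <= 0:
--         return 0
--     if x * 3 > y:
--         return (n // 3) * y + (n % 3) * x
--     return n * x
-- ===== Notes on version B (the rewrite author's own statement) =====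
-- stated objective: faster
-- what changed: Replaced the per-item while loop with a closed-form arithmetic formula: (n//3)*y + (n%3)*x when a triple is cheaper than three singles, else n*x.
import Mathlib
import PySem

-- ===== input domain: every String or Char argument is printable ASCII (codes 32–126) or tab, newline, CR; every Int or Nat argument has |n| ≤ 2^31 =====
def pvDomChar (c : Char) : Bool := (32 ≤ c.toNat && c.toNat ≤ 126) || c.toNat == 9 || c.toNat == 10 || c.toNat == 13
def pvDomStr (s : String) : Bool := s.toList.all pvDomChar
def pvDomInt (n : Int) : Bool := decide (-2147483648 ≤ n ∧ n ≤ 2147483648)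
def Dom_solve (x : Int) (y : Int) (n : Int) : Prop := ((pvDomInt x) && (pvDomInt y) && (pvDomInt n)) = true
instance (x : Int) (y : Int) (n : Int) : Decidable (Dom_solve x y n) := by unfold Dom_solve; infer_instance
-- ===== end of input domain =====

-- B replaces A's per-item while loop with a closed-form O(1) arithmetic formula.


-- ===== PORT A =====
-- while n > 0: take a batch of 3 when n ≥ 3 and 3x > y, else one single item
def solveLoop (x : Int) (y : Int) (ans : Int) (n : Int) : Int :=
  if _h : n > 0 then
    if n ≥ 3 then
      if x * 3 > y then solveLoop x y (ans + y) (n - 3)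
      else solveLoop x y (ans + x) (n - 1)
    else solveLoop x y (ans + x) (n - 1)
  else ans
termination_by n.toNat
decreasing_by all_goals omega

def solve (x : Int) (y : Int) (n : Int) : Int := solveLoop x y 0 n

-- ===== PORT B =====
def solve_alt (x : Int) (y : Int) (n : Int) : Int :=
  if n ≤ 0 then 0
  else if x * 3 > y then PySem.Int.floordiv n 3 * y + PySem.Int.mod n 3 * x
  else n * x

-- ===== PRECONDITION & SPEC =====
def Spec_solve (x : Int) (y : Int) (n : Int) (out : Int) : Prop := out = solve_alt x y n
instance (x : Int) (y : Int) (n : Int) (out : Int) : Decidable (Spec_solve x y n out) := by unfold Spec_solve; infer_instance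

-- ===== CLAIM (what is proved, stated in full; the proofs are below) =====
def Claim_equal_solve : Prop := ∀ (x : Int) (y : Int) (n : Int), Dom_solve x y n → Spec_solve x y n (solve x y n)

-- ===== LEMMAS AND PROOFS =====
theorem solveLoop_eq_alt (x y : Int) : ∀ (n ans : Int), solveLoop x y ans n = ans + solve_alt x y n := by
  have H : ∀ (k : Nat) (n : Int), n.toNat = k → ∀ ans : Int,
      solveLoop x y ans n = ans + solve_alt x y n := by
    intro k
    induction k using Nat.strong_induction_on with
    | _ k ih0 =>
    intro n hk ans
    have ih : ∀ m : Int, m.toNat < k → ∀ a : Int,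
        solveLoop x y a m = a + solve_alt x y m := by
      intro m hm a; exact ih0 m.toNat hm m rfl a
    rw [solveLoop]
    by_cases h0 : n > 0
    · simp only [h0, dif_pos]
      by_cases h3 : n ≥ 3
      · by_cases hxy : x * 3 > y
        · simp only [h3, hxy, if_pos]
          rw [ih (n - 3) (by omega)]
          simp only [solve_alt, show ¬ n ≤ 0 by omega, if_neg, not_false_iff, hxy, if_pos]
          rw [PySem.Int.floordiv_eq_ediv_of_pos (a := n) (by omega),
              PySem.Int.mod_eq_emod_of_pos (a := n) (by omega)]
          by_cases h6 : n - 3 ≤ 0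
          · have hn3 : n = 3 := by omega
            subst hn3; norm_num
          · simp only [h6, if_neg, not_false_iff]
            rw [PySem.Int.floordiv_eq_ediv_of_pos (a := n - 3) (by omega),
                PySem.Int.mod_eq_emod_of_pos (a := n - 3) (by omega)]
            have hd : (n - 3) / 3 = n / 3 - 1 := by omega
            have hm : (n - 3) % 3 = n % 3 := by omega
            rw [hd, hm]; ring
        · simp only [h3, hxy, if_pos, if_neg, not_false_iff]
          rw [ih (n - 1) (by omega)]
          simp only [solve_alt, show ¬ n ≤ 0 by omega, if_neg, not_false_iff, hxy]
          by_cases h1 : n - 1 ≤ 0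
          · have : n = 1 := by omega
            subst this; norm_num
          · simp only [h1, if_neg, not_false_iff]
            ring
      · -- 0 < n < 3: single item
        simp only [h3, if_neg, not_false_iff]
        rw [ih (n - 1) (by omega)]
        simp only [solve_alt, show ¬ n ≤ 0 by omega, if_neg, not_false_iff]
        by_cases hxy : x * 3 > y
        · simp only [hxy, if_pos]
          rw [PySem.Int.floordiv_eq_ediv_of_pos (a := n) (by omega),
              PySem.Int.mod_eq_emod_of_pos (a := n) (by omega)]
          have hd : n / 3 = 0 := by omega
          have hm : n % 3 = n := by omega
          rw [hd, hm]
          by_cases h1 : n - 1 ≤ 0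
          · have : n = 1 := by omega
            subst this; norm_num
          · have hn2 : n = 2 := by omega
            subst hn2
            norm_num
            ring
        · simp only [hxy, if_neg, not_false_iff]
          by_cases h1 : n - 1 ≤ 0
          · have : n = 1 := by omega
            subst this; norm_num
          · simp only [h1, if_neg, not_false_iff]
            ring
    · simp only [h0, dif_neg, not_false_iff]
      simp [solve_alt, show n ≤ 0 by omega]
  intro n ans; exact H n.toNat n rfl ans

-- ===== VERDICT (by name: the statement is the Claim_ definition above) =====
theorem solve_spec : Claim_equal_solve := by
  intro x y n _
  unfold Spec_solve solve
  rw [solveLoop_eq_alt]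
  ring
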